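-- pv_equiv track=rewrite | github.com/francosalvucci14/Esercizi_ASD | Esami/Esame 30-1-24/Esame_30_01_24.py | build_structure
-- ===== SOURCE A (Python) =====
-- def build_structure(A):
--     n = len(A)
--     prefisso_uni = [0] * (n + 1)
--     prefisso_zeri = [0] * (n + 1)
--
--     for i in range(1, n + 1):
--         prefisso_uni[i] = prefisso_uni[i - 1] + A[i - 1]
--         prefisso_zeri[i] = prefisso_zeri[i - 1] + (1 - A[i - 1])
--
--     return prefisso_uni, prefisso_zeri
-- ===== SOURCE B (Python) =====
-- def build_structure(A):
--     n = len(A)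
--     ones = [sum(A[:i]) for i in range(n + 1)]
--     zeros = [i - s for i, s in enumerate(ones)]
--     return ones, zeros
-- ===== Notes on version B (the rewrite author's own statement) =====
-- stated objective: simpler
-- what changed: B drops A's accumulating loop entirely: each ones-prefix entry is computed independently as sum(A[:i]) over a slice, and the zeros-prefix is derived by the identity zeros[i] = i - ones[i]; this trades A's O(n) pass for a plainer O(n^2) pair of comprehensions with identical outputs.
import Mathlib
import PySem

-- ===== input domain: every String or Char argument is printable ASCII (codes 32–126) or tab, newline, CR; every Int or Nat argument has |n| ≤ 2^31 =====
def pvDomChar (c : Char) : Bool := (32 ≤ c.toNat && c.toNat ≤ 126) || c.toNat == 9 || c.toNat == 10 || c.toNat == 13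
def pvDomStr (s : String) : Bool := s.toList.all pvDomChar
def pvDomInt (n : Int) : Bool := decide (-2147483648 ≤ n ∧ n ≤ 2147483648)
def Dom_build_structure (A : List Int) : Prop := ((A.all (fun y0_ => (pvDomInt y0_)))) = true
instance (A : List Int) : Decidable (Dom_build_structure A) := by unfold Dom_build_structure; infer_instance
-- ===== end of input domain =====

-- B computes each ones-prefix entry independently as sum(A[:i]) (no accumulator) and derives zeros as i - ones[i]; same outputs, a different decomposition.

-- ===== PORT A =====
-- the for-loop 'for i in range(1, n+1)' as a counter recursion: i is the current index, r the remaining iterations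
def build_structure_loop (A : List Int) : Nat → Nat → List Int → List Int → List Int × List Int
  | _, 0, uni, zeri => (uni, zeri)
  | i, r + 1, uni, zeri =>
      let a := (PySem.List.pyGet? A ((i : Int) - 1)).getD 0
      build_structure_loop A (i + 1) r
        (uni.set i (uni.getD (i - 1) 0 + a))
        (zeri.set i (zeri.getD (i - 1) 0 + (1 - a)))

def build_structure (A : List Int) : List Int × List Int :=
  let n := A.length
  build_structure_loop A 1 n (List.replicate (n + 1) (0 : Int)) (List.replicate (n + 1) (0 : Int))

-- ===== PORT B =====
-- 'ones = [sum(A[:i]) for i in range(n + 1)]; zeros = [i - s for i, s in enumerate(ones)]'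
def build_structure_alt (A : List Int) : List Int × List Int :=
  let n := (A.length : Int)
  let ones := (PySem.List.pyRange 0 (n + 1) 1).map (fun i => (PySem.List.slice A none (some i)).sum)
  (ones, (PySem.List.enumerate ones 0).map (fun p => p.1 - p.2))

-- ===== PRECONDITION & SPEC =====
def Spec_build_structure (A : List Int) (out : List Int × List Int) : Prop := out = build_structure_alt A
instance (A : List Int) (out : List Int × List Int) : Decidable (Spec_build_structure A out) := by unfold Spec_build_structure; infer_instance

-- ===== CLAIM (what is proved, stated in full; the proofs are below) =====
def Claim_equal_build_structure : Prop := ∀ (A : List Int), Dom_build_structure A → Spec_build_structure A (build_structure A)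

-- ===== LEMMAS AND PROOFS =====

-- proof-only helper: the running-sum scan both ports are reduced to
def build_structure_scan (s : Int) : List Int → List Int
  | [] => []
  | x :: xs => (s + x) :: build_structure_scan (s + x) xs

theorem scan_snoc (x : Int) : ∀ (pre : List Int) (s : Int),
    build_structure_scan s (pre ++ [x]) = build_structure_scan s pre ++ [s + pre.sum + x] := by
  intro pre
  induction pre with
  | nil => intro s; simp [build_structure_scan]
  | cons y ys ih =>
      intro s
      simp only [List.cons_append, build_structure_scan, ih (s + y), List.sum_cons]
      ring_nf

theorem scan_getD : ∀ (pre : List Int) (s : Int),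
    (s :: build_structure_scan s pre).getD pre.length 0 = s + pre.sum := by
  intro pre
  induction pre with
  | nil => intro s; simp
  | cons y ys ih =>
      intro s
      have h := ih (s + y)
      simp only [List.getD, build_structure_scan, List.length_cons,
        List.getElem?_cons_succ, List.sum_cons] at h ⊢
      rw [h]; ring

theorem set_append_replicate (U : List Int) (r : Nat) (v : Int) :
    (U ++ List.replicate (r + 1) (0 : Int)).set U.length v = (U ++ [v]) ++ List.replicate r 0 := by
  induction U with
  | nil => simp [List.replicate_succ]
  | cons y ys ih => simp [ih]

theorem getD_append_left (U t : List Int) (j : Nat) (h : j < U.length) :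
    (U ++ t).getD j 0 = U.getD j 0 := by
  simp [List.getD, List.getElem?_append_left h]

-- the loop invariant: after consuming pre, the arrays hold the scans of pre padded with zeros
theorem loop_invariant : ∀ (rest pre : List Int),
    build_structure_loop (pre ++ rest) (pre.length + 1) rest.length
        ((0 :: build_structure_scan 0 pre) ++ List.replicate rest.length 0)
        ((0 :: build_structure_scan 0 (pre.map (fun a => 1 - a))) ++ List.replicate rest.length 0)
      = (0 :: build_structure_scan 0 (pre ++ rest),
         0 :: build_structure_scan 0 ((pre ++ rest).map (fun a => 1 - a))) := by
  intro rest
  induction rest with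
  | nil => intro pre; simp [build_structure_loop]
  | cons x xs ih =>
      intro pre
      simp only [List.length_cons]
      have hlenU : (0 :: build_structure_scan 0 pre).length = pre.length + 1 := by
        have : ∀ (l : List Int) (s : Int), (build_structure_scan s l).length = l.length := by
          intro l; induction l with
          | nil => intro s; rfl
          | cons a as ihl => intro s; simp [build_structure_scan, ihl]
        simp [this]
      have hlenZ : (0 :: build_structure_scan 0 (pre.map (fun a => 1 - a))).length = pre.length + 1 := by
        have : ∀ (l : List Int) (s : Int), (build_structure_scan s l).length = l.length := by
          intro l; induction l with
          | nil => intro s; rfl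
          | cons a as ihl => intro s; simp [build_structure_scan, ihl]
        simp [this]
      have hget : (PySem.List.pyGet? (pre ++ x :: xs) ((((pre.length + 1) : Nat) : Int) - 1)).getD 0 = x := by
        have : ((((pre.length + 1) : Nat) : Int) - 1) = ((pre.length : Nat) : Int) := by push_cast; ring
        rw [this, PySem.List.pyGet?_natCast]
        simp
      have huniG :
          (((0 :: build_structure_scan 0 pre) ++ List.replicate (xs.length + 1) 0).getD (pre.length + 1 - 1) 0)
            = pre.sum := by
        rw [show pre.length + 1 - 1 = pre.length from rfl,
            getD_append_left _ _ _ (by rw [hlenU]; omega)]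
        simpa using scan_getD pre 0
      have hzerG :
          (((0 :: build_structure_scan 0 (pre.map (fun a => 1 - a))) ++ List.replicate (xs.length + 1) 0).getD (pre.length + 1 - 1) 0)
            = (pre.map (fun a => 1 - a)).sum := by
        rw [show pre.length + 1 - 1 = pre.length from rfl,
            getD_append_left _ _ _ (by rw [hlenZ]; omega)]
        simpa using scan_getD (pre.map (fun a => 1 - a)) 0
      have hsetU :
          ((0 :: build_structure_scan 0 pre) ++ List.replicate (xs.length + 1) 0).set (pre.length + 1) (pre.sum + x)
            = (0 :: build_structure_scan 0 (pre ++ [x])) ++ List.replicate xs.length 0 := by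
        rw [← hlenU, set_append_replicate, scan_snoc]
        simp
      have hsetZ :
          ((0 :: build_structure_scan 0 (pre.map (fun a => 1 - a))) ++ List.replicate (xs.length + 1) 0).set (pre.length + 1)
              ((pre.map (fun a => 1 - a)).sum + (1 - x))
            = (0 :: build_structure_scan 0 ((pre ++ [x]).map (fun a => 1 - a))) ++ List.replicate xs.length 0 := by
        rw [← hlenZ, set_append_replicate]
        rw [show (pre ++ [x]).map (fun a => 1 - a) = pre.map (fun a => 1 - a) ++ [1 - x] by simp,
            scan_snoc]
        simp
      have := ih (pre ++ [x])
      simp only [List.append_assoc, List.singleton_append, List.length_append, List.length_singleton] at this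
      simp only [build_structure_loop, hget]
      rw [huniG, hzerG, hsetU, hsetZ]
      simpa using this

theorem enumerate_scan_map : ∀ (l : List Int) (s k : Int),
    (PySem.List.enumerate (build_structure_scan s l) k).map (fun p => p.1 - p.2)
      = build_structure_scan (k - 1 - s) (l.map (fun a => 1 - a)) := by
  intro l
  induction l with
  | nil => intro s k; simp [build_structure_scan]
  | cons x xs ih =>
      intro s k
      simp only [build_structure_scan, List.map_cons, PySem.List.enumerate_cons, List.map]
      rw [ih (s + x) (k + 1)]
      rw [show k - (s + x) = k - 1 - s + (1 - x) by ring,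
          show k + 1 - 1 - (s + x) = k - 1 - s + (1 - x) by ring]

-- per-index slice sums coincide with the scan
theorem take_sum_scan : ∀ (l : List Int) (s : Int),
    (List.range l.length).map (fun i => s + (l.take (i + 1)).sum) = build_structure_scan s l := by
  intro l
  induction l with
  | nil => intro s; simp [build_structure_scan]
  | cons x xs ih =>
      intro s
      rw [List.length_cons, List.range_succ_eq_map, List.map_cons, List.map_map]
      simp only [List.take_succ_cons, List.sum_cons]
      have hhead : s + (x + (List.take 0 xs).sum) = s + x := by simp
      have htail : List.map ((fun i => s + (x + (List.take i xs).sum)) ∘ Nat.succ) (List.range xs.length)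
          = build_structure_scan (s + x) xs := by
        rw [← ih (s + x)]
        apply List.map_congr_left
        intro i _
        simp only [Function.comp]
        ring
      rw [hhead, htail, build_structure_scan]

theorem ones_eq (A : List Int) :
    (PySem.List.pyRange 0 ((A.length : Int) + 1) 1).map (fun i => (PySem.List.slice A none (some i)).sum)
      = 0 :: build_structure_scan 0 A := by
  rw [PySem.List.pyRange_one]
  have hN : (((A.length : Int) + 1) - 0).toNat = A.length + 1 := by omega
  rw [hN, List.map_map]
  have : ∀ k : Nat, ((fun i => (PySem.List.slice A none (some i)).sum) ∘ fun k : Nat => (0 : Int) + k) k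
      = (A.take k).sum := by
    intro k
    simp [Function.comp, PySem.List.slice_to_natCast]
  rw [List.map_congr_left (fun k _ => this k)]
  rw [List.range_succ_eq_map, List.map_cons, List.map_map]
  simp only [List.take_zero, List.sum_nil]
  congr 1
  rw [← take_sum_scan A 0]
  congr 1
  funext i
  simp [Function.comp]

theorem alt_eq (A : List Int) :
    build_structure_alt A = (0 :: build_structure_scan 0 A,
                             0 :: build_structure_scan 0 (A.map (fun a => 1 - a))) := by
  simp only [build_structure_alt]
  rw [ones_eq]
  simp only [PySem.List.enumerate_cons, List.map_cons]
  rw [enumerate_scan_map A 0 (0 + 1)]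
  norm_num

-- ===== VERDICT (by name: the statement is the Claim_ definition above) =====
theorem build_structure_spec : Claim_equal_build_structure := by
  intro A _
  unfold Spec_build_structure build_structure
  rw [alt_eq]
  have := loop_invariant A []
  simpa [List.replicate_succ] using this
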